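-- pv_equiv track=rewrite | github.com/TomaszLitwicki/RAG | services/retriever.py | count_keyword_matches
-- ===== SOURCE A (Python) =====
-- def count_keyword_matches(question_tokens: set[str], keywords: list[str]) -> int:
--     count = 0
--
--     for token in question_tokens:
--         for keyword in keywords:
--             if token.startswith(keyword):
--                 count += 1
--                 break
--     return count
-- ===== SOURCE B (Python) =====
-- def count_keyword_matches(question_tokens: set[str], keywords: list[str]) -> int:
--     kwset = set(keywords)
--     maxlen = max(map(len, keywords), default=-1)
--     count = 0
--     for token in question_tokens:
--         upper = min(len(token), maxlen)
--         if any(token[:i] in kwset for i in range(upper + 1)):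
--             count += 1
--     return count
-- ===== Notes on version B (the rewrite author's own statement) =====
-- stated objective: faster
-- what changed: Instead of scanning the keyword list for every token (prefix test per pair), B hashes the keywords into a set once and, per token, checks each of the token's own prefixes (up to the longest keyword length) for membership, removing the inner scan over keywords.
import Mathlib
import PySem

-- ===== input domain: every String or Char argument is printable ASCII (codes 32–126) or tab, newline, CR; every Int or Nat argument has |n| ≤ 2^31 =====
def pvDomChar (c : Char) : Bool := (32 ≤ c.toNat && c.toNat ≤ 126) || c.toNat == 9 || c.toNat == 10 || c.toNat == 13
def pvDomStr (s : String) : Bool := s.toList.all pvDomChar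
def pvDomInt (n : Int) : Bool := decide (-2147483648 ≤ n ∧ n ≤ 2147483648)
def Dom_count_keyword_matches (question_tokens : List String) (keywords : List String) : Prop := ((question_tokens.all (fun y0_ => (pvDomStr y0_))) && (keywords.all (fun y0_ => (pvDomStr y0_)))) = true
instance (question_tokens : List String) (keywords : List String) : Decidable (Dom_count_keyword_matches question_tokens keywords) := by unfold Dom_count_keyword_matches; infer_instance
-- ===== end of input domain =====

-- B replaces A's per-token scan over the keyword list with one keyword hash-set built
-- once, testing each token's own prefixes for membership (objective: faster).
-- ===== PORT A =====
-- inner 'for keyword in keywords: if token.startswith(keyword): count += 1; break'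
def pvFirstMatch (token : String) : List String → Bool
  | [] => false
  | k :: ks => if PySem.Str.startswith token k then true else pvFirstMatch token ks

def count_keyword_matches (question_tokens : List String) (keywords : List String) : Int :=
  question_tokens.foldl
    (fun count token => if pvFirstMatch token keywords then count + 1 else count) 0

-- ===== PORT B =====
-- maxlen = max(map(len, keywords), default=-1)
def pvMaxLen (keywords : List String) : Int :=
  keywords.foldl (fun m k => max m (PySem.Str.len k)) (-1)

def count_keyword_matches_alt (question_tokens : List String) (keywords : List String) : Int :=
  let kwset : PySem.Set String := PySem.Set.ofList keywords
  let maxlen : Int := pvMaxLen keywords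
  question_tokens.foldl
    (fun count token =>
      let upper : Int := min (PySem.Str.len token) maxlen
      if (PySem.List.pyRange 0 (upper + 1) 1).any
           (fun i => kwset.contains (PySem.Str.slice token none (some i)))
      then count + 1 else count) 0

-- ===== PRECONDITION & SPEC =====
def Spec_count_keyword_matches (question_tokens : List String) (keywords : List String) (out : Int) : Prop := out = count_keyword_matches_alt question_tokens keywords
instance (question_tokens : List String) (keywords : List String) (out : Int) : Decidable (Spec_count_keyword_matches question_tokens keywords out) := by unfold Spec_count_keyword_matches; infer_instance

-- ===== CLAIM (what is proved, stated in full; the proofs are below) =====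
def Claim_equal_count_keyword_matches : Prop := ∀ (question_tokens : List String) (keywords : List String), Dom_count_keyword_matches question_tokens keywords → Spec_count_keyword_matches question_tokens keywords (count_keyword_matches question_tokens keywords)

-- ===== LEMMAS AND PROOFS =====



-- per-token agreement of the two match tests
lemma pvFirstMatch_iff (t : String) (ks : List String) :
    pvFirstMatch t ks = true ↔ ∃ k ∈ ks, PySem.Str.startswith t k = true := by
  induction ks with
  | nil => simp [pvFirstMatch]
  | cons k ks ih =>
    simp only [pvFirstMatch]
    by_cases h : PySem.Str.startswith t k = true
    · rw [if_pos h]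
      exact iff_of_true rfl ⟨k, List.mem_cons_self, h⟩
    · rw [if_neg h, ih]
      constructor
      · rintro ⟨x, hx, hsw⟩
        exact ⟨x, List.mem_cons_of_mem _ hx, hsw⟩
      · rintro ⟨x, hx, hsw⟩
        rcases List.mem_cons.mp hx with rfl | hx
        · exact absurd hsw h
        · exact ⟨x, hx, hsw⟩

lemma pvFoldlMax_mono (c : Int) (xs : List String) (i : Int) (h : c ≤ i) :
    c ≤ xs.foldl (fun m x => max m (PySem.Str.len x)) i := by
  induction xs generalizing i with
  | nil => simpa using h
  | cons y ys ih => exact ih _ (le_trans h (le_max_left _ _))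

lemma pvMaxLen_ge (ks : List String) (k : String) (hk : k ∈ ks) :
    PySem.Str.len k ≤ pvMaxLen ks := by
  unfold pvMaxLen
  suffices H : ∀ (init : Int), k ∈ ks →
      PySem.Str.len k ≤ ks.foldl (fun m x => max m (PySem.Str.len x)) init from H _ hk
  clear hk
  induction ks with
  | nil => intro _ h; simp at h
  | cons x xs ih =>
    intro init h
    rcases List.mem_cons.mp h with rfl | h
    · simp only [List.foldl_cons]
      exact pvFoldlMax_mono _ _ _ (le_max_right _ _)
    · exact ih _ h

lemma pvToken_agree (ks : List String) (t : String) :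
    pvFirstMatch t ks =
      (PySem.List.pyRange 0 (min (PySem.Str.len t) (pvMaxLen ks) + 1) 1).any
        (fun i => (PySem.Set.ofList ks).contains (PySem.Str.slice t none (some i))) := by
  rw [Bool.eq_iff_iff, pvFirstMatch_iff, List.any_eq_true]
  constructor
  · rintro ⟨k, hk, hsw⟩
    refine ⟨PySem.Str.len k, ?_, ?_⟩
    · rw [PySem.List.mem_pyRange_one]
      have hpre : k.toList <+: t.toList := by
        rw [PySem.Str.startswith_eq] at hsw
        exact (PySem.Chars.startswith_iff _ _).mp hsw
      have hlen : k.toList.length ≤ t.toList.length := hpre.length_le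
      have h1 : PySem.Str.len k ≤ PySem.Str.len t := by
        rw [PySem.Str.len_eq, PySem.Str.len_eq]; exact_mod_cast hlen
      have h2 := pvMaxLen_ge ks k hk
      have h0 : (0:Int) ≤ PySem.Str.len k := by rw [PySem.Str.len_eq]; positivity
      omega
    · have hpre : k.toList <+: t.toList := by
        rw [PySem.Str.startswith_eq] at hsw
        exact (PySem.Chars.startswith_iff _ _).mp hsw
      have hslice : (PySem.Str.slice t none (some (PySem.Str.len k))).toList = k.toList := by
        rw [PySem.Str.toList_slice, PySem.Chars.slice_eq_listSlice, PySem.Str.len_eq]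
        rw [PySem.List.slice_to _ (by positivity)]
        have : ((k.toList.length : Int)).toNat = k.toList.length := Int.toNat_natCast _
        rw [this]
        exact ((List.prefix_iff_eq_take.mp hpre)).symm
      have hstr : PySem.Str.slice t none (some (PySem.Str.len k)) = k :=
        String.toList_injective hslice
      rw [hstr]
      simpa [PySem.Set.contains_iff, PySem.Set.mem_ofList] using hk
  · rintro ⟨i, hi, hc⟩
    rw [PySem.List.mem_pyRange_one] at hi
    set s := PySem.Str.slice t none (some i) with hs
    have hmem : s ∈ ks := by
      have := (PySem.Set.contains_iff (PySem.Set.ofList ks) s).mp hc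
      rwa [PySem.Set.mem_ofList] at this
    refine ⟨s, hmem, ?_⟩
    rw [PySem.Str.startswith_eq]
    apply (PySem.Chars.startswith_iff _ _).mpr
    rw [hs, PySem.Str.toList_slice, PySem.Chars.slice_eq_listSlice,
      PySem.List.slice_to _ (by omega)]
    exact List.take_prefix _ _

-- ===== VERDICT (by name: the statement is the Claim_ definition above) =====
theorem count_keyword_matches_spec : Claim_equal_count_keyword_matches := by
  intro qt ks _
  unfold Spec_count_keyword_matches count_keyword_matches count_keyword_matches_alt
  simp only []
  congr 1
  funext count token
  rw [pvToken_agree]
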